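-- pv_equiv track=rewrite | github.com/soma-dev-lang/soma | bench/py/e_spigot.py | e_digits
-- ===== SOURCE A (Python) =====
-- def e_digits(n):
--     """Spigot algorithm for digits of e."""
--     a = [1] * (n + 2)
--     out = ['2', '.']
--     for _ in range(n):
--         # Multiply by 10
--         carry = 0
--         for j in range(n + 1, 0, -1):
--             x = a[j] * 10 + carry
--             a[j] = x % (j + 1)
--             carry = x // (j + 1)
--         out.append(str(carry))
--     return ''.join(out)
-- ===== SOURCE B (Python) =====
-- def e_digits(n):
--     """Digits of e by exact long division: represent the truncated series
--     sum_{k=2}^{n+2} 1/k! as a single fraction p/q with q=(n+2)!, then emit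
--     decimal digits by repeated multiply-by-10 and divmod on one big integer."""
--     q = 1
--     p = 0
--     for k in range(2, n + 3):
--         q *= k
--         p = p * k + 1
--     out = ['2', '.']
--     r = p
--     for _ in range(n):
--         d, r = divmod(r * 10, q)
--         out.append(str(d))
--     return ''.join(out)
-- ===== Notes on version B (the rewrite author's own statement) =====
-- stated objective: faster
-- what changed: Replaces the spigot's per-digit O(n) mixed-radix array sweep by one exact fraction p/q with q=(n+2)! (built by a Horner loop) whose digits are emitted by big-integer multiply-by-10 and divmod, moving the inner work from an interpreted Python loop into C big-int operations.
import Mathlib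
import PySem

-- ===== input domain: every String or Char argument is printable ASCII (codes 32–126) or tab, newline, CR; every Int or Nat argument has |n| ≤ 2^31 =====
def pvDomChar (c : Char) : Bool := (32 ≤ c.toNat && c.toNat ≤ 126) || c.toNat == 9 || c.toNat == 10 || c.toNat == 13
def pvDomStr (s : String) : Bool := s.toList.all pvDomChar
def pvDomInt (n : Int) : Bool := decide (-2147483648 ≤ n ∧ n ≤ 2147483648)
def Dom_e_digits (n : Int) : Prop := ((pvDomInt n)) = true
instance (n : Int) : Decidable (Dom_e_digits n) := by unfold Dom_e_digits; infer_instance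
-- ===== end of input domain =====

-- B replaces A's O(n^2) per-digit spigot array by one exact fraction p/q (q=(n+2)!) whose
-- decimal digits are emitted by big-integer long division: constant-factor faster, same value.

-- ===== PORT A =====
-- a[j] is always in range when the loops run (1 ≤ j ≤ n+1 < len a = n+2), so Python never
-- raises here; pyGetD/pySetD are exact on those indices.
def e_digits (n : Int) : String :=
  let a : List Int := PySem.List.pyRepeat [(1 : Int)] (n + 2)
  let out : List String := ["2", "."]
  let st := (PySem.List.pyRange 0 n 1).foldl
    (fun (st : List Int × List String) _ =>
      let inner := (PySem.List.pyRange (n + 1) 0 (-1)).foldl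
        (fun (s : List Int × Int) j =>
          let x := (PySem.List.pyGetD s.1 j 0) * 10 + s.2
          (PySem.List.pySetD s.1 j (PySem.Int.mod x (j + 1)), PySem.Int.floordiv x (j + 1)))
        (st.1, 0)
      (inner.1, st.2 ++ [PySem.Int.toStr inner.2]))
    (a, out)
  PySem.Str.join "" st.2

-- ===== PORT B =====
-- divmod(r*10, q) is ported as (floordiv, mod); q ≥ 1 always, so Python's divmod returns.
def e_digits_alt (n : Int) : String :=
  let pq := (PySem.List.pyRange 2 (n + 3) 1).foldl
    (fun (s : Int × Int) k => (s.1 * k, s.2 * k + 1)) (1, 0)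
  let st := (PySem.List.pyRange 0 n 1).foldl
    (fun (s : Int × List String) _ =>
      let d := PySem.Int.floordiv (s.1 * 10) pq.1
      let r := PySem.Int.mod (s.1 * 10) pq.1
      (r, s.2 ++ [PySem.Int.toStr d]))
    (pq.2, ["2", "."])
  PySem.Str.join "" st.2

-- ===== PRECONDITION & SPEC =====
def Spec_e_digits (n : Int) (out : String) : Prop := out = e_digits_alt n
instance (n : Int) (out : String) : Decidable (Spec_e_digits n out) := by unfold Spec_e_digits; infer_instance

-- ===== CLAIM (what is proved, stated in full; the proofs are below) =====
def Claim_equal_e_digits : Prop := ∀ (n : Int), Dom_e_digits n → Spec_e_digits n (e_digits n)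

-- ===== LEMMAS AND PROOFS =====

-- factorial over Int
def fct : Nat → Int
  | 0 => 1
  | m + 1 => (m + 1) * fct m

lemma fct_pos (m : Nat) : 0 < fct m := by
  induction m with
  | zero => norm_num [fct]
  | succ k ih => simpa [fct] using by positivity

-- value of the spigot state anchored at (m+1)!:  Aval m a = Σ_{j=1}^{m} a[j] * (m+1)!/(j+1)!
def Aval : Nat → List Int → Int
  | 0, _ => 0
  | m + 1, a => a.getD (m + 1) 0 + ((m : Int) + 2) * Aval m a

lemma Aval_congr (m : Nat) (a b : List Int)
    (h : ∀ j, 1 ≤ j → j ≤ m → a.getD j 0 = b.getD j 0) : Aval m a = Aval m b := by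
  induction m with
  | zero => rfl
  | succ k ih =>
      simp only [Aval]
      rw [h (k + 1) (by omega) (by omega), ih (fun j h1 h2 => h j h1 (by omega))]

lemma Aval_bounds (m : Nat) (a : List Int)
    (h : ∀ j, 1 ≤ j → j ≤ m → 0 ≤ a.getD j 0 ∧ a.getD j 0 ≤ (j : Int)) :
    0 ≤ Aval m a ∧ Aval m a < fct (m + 1) := by
  induction m with
  | zero => simp [Aval, fct]
  | succ k ih =>
      obtain ⟨h0, h1⟩ := ih (fun j hj1 hj2 => h j hj1 (by omega))
      obtain ⟨g0, g1⟩ := h (k + 1) (by omega) (by omega)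
      have hmul : ((k : Int) + 2) * Aval k a ≤ ((k : Int) + 2) * (fct (k + 1) - 1) :=
        mul_le_mul_of_nonneg_left (by omega) (by positivity)
      have hmul0 : 0 ≤ ((k : Int) + 2) * Aval k a := mul_nonneg (by positivity) h0
      have hfct : fct (k + 1 + 1) = ((k : Int) + 2) * fct (k + 1) := by
        simp only [fct]; push_cast; ring
      constructor
      · simp only [Aval]; linarith
      · simp only [Aval, hfct]
        push_cast at g1
        linarith

-- the inner-loop step of port A
def stepIn : List Int × Int → Int → List Int × Int :=
  fun s j =>
    let x := (PySem.List.pyGetD s.1 j 0) * 10 + s.2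
    (PySem.List.pySetD s.1 j (PySem.Int.mod x (j + 1)), PySem.Int.floordiv x (j + 1))

-- the inner loop j = m, m-1, …, 1 is exact multiply-by-10-then-divmod on the factorial-base value
lemma inner_spec (m : Nat) : ∀ (a : List Int) (c : Int), m < a.length → 0 ≤ c →
    (∀ j, 1 ≤ j → j ≤ m → 0 ≤ a.getD j 0) →
    (let r := (PySem.List.pyRange (m : Int) 0 (-1)).foldl stepIn (a, c)
     r.1.length = a.length ∧
     (∀ j, j = 0 ∨ m < j → r.1.getD j 0 = a.getD j 0) ∧
     0 ≤ r.2 ∧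
     (∀ j, 1 ≤ j → j ≤ m → 0 ≤ r.1.getD j 0 ∧ r.1.getD j 0 ≤ (j : Int)) ∧
     r.2 * fct (m + 1) + Aval m r.1 = 10 * Aval m a + c) := by
  induction m with
  | zero =>
      intro a c _ hc _
      rw [PySem.List.pyRange_neg_one_eq_nil (by norm_num)]
      exact ⟨rfl, fun j _ => rfl, hc, fun j h1 h2 => by omega, by simp [Aval, fct]⟩
  | succ k ih =>
      intro a c hlen hc hnn
      rw [PySem.List.pyRange_neg_one_cons (by exact_mod_cast Nat.succ_pos k)]
      simp only [List.foldl_cons]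
      -- the first step, at j = k+1
      set x : Int := a.getD (k + 1) 0 * 10 + c with hx
      have hxnn : 0 ≤ x := by
        have := hnn (k + 1) (by omega) (by omega)
        nlinarith
      have hstep : stepIn (a, c) ((k + 1 : Nat) : Int)
          = (a.set (k + 1) (x % ((k : Int) + 2)), x / ((k : Int) + 2)) := by
        simp only [stepIn, PySem.List.pyGetD_natCast, PySem.List.pySetD_natCast]
        rw [PySem.Int.mod_eq_emod_of_pos (by push_cast; omega),
            PySem.Int.floordiv_eq_ediv_of_pos (by push_cast; omega)]
        rw [show ((k + 1 : Nat) : Int) + 1 = (k : Int) + 2 by push_cast; ring, hx]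
      rw [hstep, show ((k + 1 : Nat) : Int) - 1 = ((k : Nat) : Int) by push_cast; ring]
      set a1 : List Int := a.set (k + 1) (x % ((k : Int) + 2)) with ha1
      set c1 : Int := x / ((k : Int) + 2) with hc1
      have hlen1 : k < a1.length := by simp [ha1]; omega
      have hc1nn : 0 ≤ c1 := Int.ediv_nonneg hxnn (by positivity)
      have hgetD_a1 : ∀ j, j ≠ k + 1 → a1.getD j 0 = a.getD j 0 := by
        intro j hj
        simp only [ha1, List.getD]
        rw [List.getElem?_set_ne (by omega)]
      have hgetD_a1_self : a1.getD (k + 1) 0 = x % ((k : Int) + 2) := by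
        simp only [ha1, List.getD]
        rw [List.getElem?_set_self (by omega)]
        rfl
      have hnn1 : ∀ j, 1 ≤ j → j ≤ k → 0 ≤ a1.getD j 0 := by
        intro j h1 h2
        rw [hgetD_a1 j (by omega)]; exact hnn j h1 (by omega)
      obtain ⟨jlen, juntouched, jcnn, jbnd, jid⟩ := ih a1 c1 hlen1 hc1nn hnn1
      set r := (PySem.List.pyRange (k : Int) 0 (-1)).foldl stepIn (a1, c1) with hr
      refine ⟨by simp [jlen, ha1], ?_, jcnn, ?_, ?_⟩
      · intro j hj
        rcases hj with hj | hj
        · rw [juntouched j (Or.inl hj), hgetD_a1 j (by omega)]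
        · rw [juntouched j (Or.inr (by omega)), hgetD_a1 j (by omega)]
      · intro j h1 h2
        rcases Nat.lt_or_ge j (k + 1) with hj | hj
        · exact jbnd j h1 (by omega)
        · have hj' : j = k + 1 := by omega
          subst hj'
          rw [juntouched (k + 1) (Or.inr (by omega)), hgetD_a1_self]
          constructor
          · exact Int.emod_nonneg x (by positivity)
          · have := Int.emod_lt_of_pos x (b := (k : Int) + 2) (by positivity)
            push_cast; omega
      · -- the value identity
        have hfix : r.1.getD (k + 1) 0 = x % ((k : Int) + 2) := by
          rw [juntouched (k + 1) (Or.inr (by omega)), hgetD_a1_self]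
        have hAa1 : Aval k a1 = Aval k a :=
          Aval_congr k a1 a (fun j h1 h2 => hgetD_a1 j (by omega))
        have hdm : ((k : Int) + 2) * c1 + x % ((k : Int) + 2) = x := by
          rw [hc1]; exact Int.ediv_add_emod x ((k : Int) + 2)
        have hfct : fct (k + 1 + 1) = ((k : Int) + 2) * fct (k + 1) := by
          simp only [fct]; push_cast; ring
        simp only [Aval, hfix, hfct]
        linear_combination ((k : Int) + 2) * jid + hdm + 10 * ((k : Int) + 2) * hAa1 + 10 * hx

-- a fold whose function ignores the list elements is an iterate
lemma foldl_const {α β : Type} (f : α → α) (l : List β) :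
    ∀ (init : α), l.foldl (fun s _ => f s) init = f^[l.length] init := by
  induction l with
  | nil => intro init; rfl
  | cons x xs ih =>
      intro init
      simp only [List.foldl_cons, List.length_cons, Function.iterate_succ_apply, ih]

-- sum of ones: Aval of the all-ones initial state
def svalOnes : Nat → Int
  | 0 => 0
  | m + 1 => 1 + ((m : Int) + 2) * svalOnes m

lemma Aval_ones (m : Nat) (a : List Int)
    (h : ∀ j, 1 ≤ j → j ≤ m → a.getD j 0 = 1) : Aval m a = svalOnes m := by
  induction m with
  | zero => rfl
  | succ k ih =>
      simp only [Aval, svalOnes]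
      rw [h (k + 1) (by omega) (by omega), ih (fun j h1 h2 => h j h1 (by omega))]

-- B's Horner loop over k = 2 … K+1 produces ((K+1)!, Σ_{k=2}^{K+1} (K+1)!/k!)
lemma horner_spec (K : Nat) :
    (PySem.List.pyRange 2 (2 + (K : Int)) 1).foldl
      (fun (s : Int × Int) k => (s.1 * k, s.2 * k + 1)) (1, 0)
    = (fct (K + 1), svalOnes K) := by
  induction K with
  | zero =>
      rw [show (2 + ((0 : Nat) : Int)) = 2 by norm_num, PySem.List.pyRange_one_eq_nil (by norm_num)]
      norm_num [fct, svalOnes]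
  | succ k ih =>
      have h2 : (2 + ((k + 1 : Nat) : Int)) = (2 + ((k : Nat) : Int)) + 1 := by push_cast; ring
      rw [h2, PySem.List.pyRange_one_succ_right (by omega), List.foldl_append, ih]
      simp only [List.foldl_cons, List.foldl_nil, Prod.mk.injEq]
      constructor
      · simp only [fct]; push_cast; ring
      · simp only [svalOnes]; ring

-- the two outer loops, as step functions (for a fixed n with m = n+1)
def stepA (n : Int) : List Int × List String → List Int × List String :=
  fun st =>
    let inner := (PySem.List.pyRange (n + 1) 0 (-1)).foldl stepIn (st.1, 0)
    (inner.1, st.2 ++ [PySem.Int.toStr inner.2])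

def stepB (q : Int) : Int × List String → Int × List String :=
  fun s => (PySem.Int.mod (s.1 * 10) q, s.2 ++ [PySem.Int.toStr (PySem.Int.floordiv (s.1 * 10) q)])

lemma outer_spec (n : Int) (m : Nat) (hm : (m : Int) = n + 1) (t : Nat) :
    ∀ (a : List Int) (out : List String),
    a.length = m + 1 →
    (∀ j, 1 ≤ j → j ≤ m → 0 ≤ a.getD j 0 ∧ a.getD j 0 ≤ (j : Int)) →
    (let ra := (stepA n)^[t] (a, out)
     let rb := (stepB (fct (m + 1)))^[t] (Aval m a, out)
     ra.2 = rb.2 ∧ ra.1.length = m + 1 ∧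
     (∀ j, 1 ≤ j → j ≤ m → 0 ≤ ra.1.getD j 0 ∧ ra.1.getD j 0 ≤ (j : Int)) ∧
     rb.1 = Aval m ra.1) := by
  induction t with
  | zero => intro a out hlen hbnd; exact ⟨rfl, hlen, hbnd, rfl⟩
  | succ t ih =>
      intro a out hlen hbnd
      simp only [Function.iterate_succ_apply]
      have hq : (0 : Int) < fct (m + 1) := fct_pos (m + 1)
      -- one A step
      obtain ⟨jlen, _, jcnn, jbnd, jid⟩ :=
        inner_spec m a 0 (by omega) le_rfl (fun j h1 h2 => (hbnd j h1 h2).1)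
      rw [hm] at jid jlen jcnn jbnd
      set r := (PySem.List.pyRange (n + 1) 0 (-1)).foldl stepIn (a, 0) with hrdef
      have hbA : 0 ≤ Aval m r.1 ∧ Aval m r.1 < fct (m + 1) := Aval_bounds m r.1 jbnd
      -- identify A's digit and new state with ediv/emod
      have hkey : Aval m a * 10 = r.2 * fct (m + 1) + Aval m r.1 := by linarith
      have hdig : Aval m a * 10 / fct (m + 1) = r.2 := by
        rw [hkey, add_comm, Int.add_mul_ediv_right _ _ (by omega),
            Int.ediv_eq_zero_of_lt hbA.1 hbA.2]
        omega
      have hrem : Aval m a * 10 % fct (m + 1) = Aval m r.1 := by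
        have := Int.ediv_add_emod (Aval m a * 10) (fct (m + 1))
        rw [hdig] at this
        linarith
      have hstepA : stepA n (a, out) = (r.1, out ++ [PySem.Int.toStr r.2]) := rfl
      have hstepB : stepB (fct (m + 1)) (Aval m a, out)
          = (Aval m r.1, out ++ [PySem.Int.toStr r.2]) := by
        simp only [stepB, PySem.Int.mod_eq_emod_of_pos hq, PySem.Int.floordiv_eq_ediv_of_pos hq]
        rw [hrem, hdig]
      rw [hstepA, hstepB]
      exact ih r.1 (out ++ [PySem.Int.toStr r.2]) (by omega) jbnd

lemma getD_replicate_one (L j : Nat) (hj : j < L) :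
    (List.replicate L (1 : Int)).getD j 0 = 1 := by
  simp [List.getD, hj]

-- ===== VERDICT (by name: the statement is the Claim_ definition above) =====
theorem e_digits_spec : Claim_equal_e_digits := by
  unfold Claim_equal_e_digits Spec_e_digits
  intro n _
  by_cases hn : n ≤ 0
  · -- both outer loops are empty; the result is "2." on both sides
    simp [e_digits, e_digits_alt, PySem.List.pyRange_one_eq_nil (show n ≤ 0 from hn)]
  · replace hn : 0 < n := by omega
    set m : Nat := (n + 1).toNat with hmdef
    have hm : (m : Int) = n + 1 := by omega
    have hm1 : 1 ≤ m := by omega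
    -- initial state of A
    have hrep : PySem.List.pyRepeat [(1 : Int)] (n + 2) = List.replicate (m + 1) 1 := by
      rw [PySem.List.pyRepeat_singleton]
      congr 1
      omega
    have hbnd0 : ∀ j, 1 ≤ j → j ≤ m →
        0 ≤ (List.replicate (m + 1) (1 : Int)).getD j 0 ∧
        (List.replicate (m + 1) (1 : Int)).getD j 0 ≤ (j : Int) := by
      intro j h1 h2
      rw [getD_replicate_one (m + 1) j (by omega)]
      constructor <;> [norm_num; exact_mod_cast h1]
    -- B's p/q
    have hq : (PySem.List.pyRange 2 (n + 3) 1).foldl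
        (fun (s : Int × Int) k => (s.1 * k, s.2 * k + 1)) (1, 0) = (fct (m + 1), svalOnes m) := by
      rw [show n + 3 = 2 + (m : Int) by omega]
      exact horner_spec m
    have hones : Aval m (List.replicate (m + 1) (1 : Int)) = svalOnes m :=
      Aval_ones m _ (fun j h1 h2 => getD_replicate_one (m + 1) j (by omega))
    -- rewrite both programs' outer folds as iterates
    obtain ⟨houts, -, -, -⟩ :=
      outer_spec n m hm n.toNat (List.replicate (m + 1) 1) ["2", "."] (by simp) hbnd0
    show PySem.Str.join "" _ = PySem.Str.join "" _
    congr 1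
    have hlenR : (PySem.List.pyRange 0 n 1).length = n.toNat := by
      rw [PySem.List.length_pyRange_one]; congr 1; omega
    calc ((PySem.List.pyRange 0 n 1).foldl
            (fun (st : List Int × List String) _ =>
              let inner := (PySem.List.pyRange (n + 1) 0 (-1)).foldl
                (fun (s : List Int × Int) j =>
                  let x := (PySem.List.pyGetD s.1 j 0) * 10 + s.2
                  (PySem.List.pySetD s.1 j (PySem.Int.mod x (j + 1)), PySem.Int.floordiv x (j + 1)))
                (st.1, 0)
              (inner.1, st.2 ++ [PySem.Int.toStr inner.2]))
            (PySem.List.pyRepeat [(1 : Int)] (n + 2), ["2", "."])).2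
        = ((stepA n)^[n.toNat] (List.replicate (m + 1) 1, ["2", "."])).2 := by
          rw [hrep]
          change ((PySem.List.pyRange 0 n 1).foldl (fun st (_ : Int) => stepA n st)
            (List.replicate (m + 1) 1, ["2", "."])).2 = _
          rw [foldl_const (stepA n) (PySem.List.pyRange 0 n 1), hlenR]
      _ = ((stepB (fct (m + 1)))^[n.toNat] (Aval m (List.replicate (m + 1) 1), ["2", "."])).2 :=
          houts
      _ = _ := by
          rw [hones, hq]
          change _ = ((PySem.List.pyRange 0 n 1).foldl (fun s (_ : Int) => stepB (fct (m + 1)) s)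
            (svalOnes m, ["2", "."])).2
          rw [foldl_const (stepB (fct (m + 1))) (PySem.List.pyRange 0 n 1), hlenR]
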